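-- pv_equiv track=rewrite | github.com/Hoomano-Hackathon/affordable | affordable/affordable2.py | getValence
-- ===== SOURCE A (Python) =====
-- def getValence(sequence, hunger):
--     valence=0
--     for i in range(len(sequence)):
--         if   sequence[i]==0: valence+=-1
--         elif sequence[i]==1: valence+=-1
--         elif sequence[i]==2: valence+=50*hunger
--         elif sequence[i]==3: valence+=-5
--         elif sequence[i]==4: valence+=0
--     return valence
-- ===== SOURCE B (Python) =====
-- def getValence(sequence, hunger):
--     counts = {}
--     for v in sequence:
--         counts[v] = counts.get(v, 0) + 1
--     return (-counts.get(0, 0) - counts.get(1, 0)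
--             + 50 * hunger * counts.get(2, 0)
--             - 5 * counts.get(3, 0))
-- ===== Notes on version B (the rewrite author's own statement) =====
-- stated objective: idiomatic
-- what changed: Replaced the per-index if/elif accumulation with a one-pass count dictionary followed by a single closed arithmetic expression over the four relevant counts.
import Mathlib
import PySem

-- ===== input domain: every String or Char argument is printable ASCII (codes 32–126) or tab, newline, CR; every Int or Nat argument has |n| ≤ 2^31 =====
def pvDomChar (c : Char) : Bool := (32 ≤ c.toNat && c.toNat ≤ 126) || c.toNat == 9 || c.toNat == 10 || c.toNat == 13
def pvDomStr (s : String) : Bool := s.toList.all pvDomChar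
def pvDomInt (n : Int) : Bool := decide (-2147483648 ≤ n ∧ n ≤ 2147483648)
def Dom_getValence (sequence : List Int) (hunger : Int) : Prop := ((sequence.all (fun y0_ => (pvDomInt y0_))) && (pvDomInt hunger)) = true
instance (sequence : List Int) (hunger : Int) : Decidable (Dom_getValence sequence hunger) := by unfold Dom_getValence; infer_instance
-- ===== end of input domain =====

-- B replaces A's per-index if/elif loop with a count dictionary built in one pass
-- plus a single closed arithmetic expression over the four relevant counts (idiomatic).


-- ===== PORT A =====
def getValence (sequence : List Int) (hunger : Int) : Int :=
  (PySem.List.pyRange 0 (PySem.List.len sequence) 1).foldl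
    (fun valence i =>
      if PySem.List.pyGetD sequence i 0 = 0 then valence + (-1)
      else if PySem.List.pyGetD sequence i 0 = 1 then valence + (-1)
      else if PySem.List.pyGetD sequence i 0 = 2 then valence + 50 * hunger
      else if PySem.List.pyGetD sequence i 0 = 3 then valence + (-5)
      else if PySem.List.pyGetD sequence i 0 = 4 then valence + 0
      else valence) 0

-- ===== PORT B =====
def getValence_alt (sequence : List Int) (hunger : Int) : Int :=
  let counts : PySem.Dict Int Int :=
    sequence.foldl (fun d v => d.modify v 0 (· + 1)) PySem.Dict.empty;
  -counts.getD 0 0 - counts.getD 1 0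
    + 50 * hunger * counts.getD 2 0
    - 5 * counts.getD 3 0

-- ===== PRECONDITION & SPEC =====
def Spec_getValence (sequence : List Int) (hunger : Int) (out : Int) : Prop := out = getValence_alt sequence hunger
instance (sequence : List Int) (hunger : Int) (out : Int) : Decidable (Spec_getValence sequence hunger out) := by unfold Spec_getValence; infer_instance

-- ===== CLAIM (what is proved, stated in full; the proofs are below) =====
def Claim_equal_getValence : Prop := ∀ (sequence : List Int) (hunger : Int), Dom_getValence sequence hunger → Spec_getValence sequence hunger (getValence sequence hunger)

-- ===== LEMMAS AND PROOFS =====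

-- A's loop over indices is a fold over the list itself, and it computes the count combination.
theorem getValence_foldl_count (sequence : List Int) (hunger : Int) (acc : Int) :
    sequence.foldl
      (fun valence x =>
        if x = 0 then valence + (-1)
        else if x = 1 then valence + (-1)
        else if x = 2 then valence + 50 * hunger
        else if x = 3 then valence + (-5)
        else if x = 4 then valence + 0
        else valence) acc
    = acc - sequence.count 0 - sequence.count 1
        + 50 * hunger * sequence.count 2 - 5 * sequence.count 3 := by
  induction sequence generalizing acc with
  | nil => simp
  | cons y t ih =>
    simp only [List.foldl_cons, ih, List.count_cons]
    by_cases h0 : y = 0 <;> by_cases h1 : y = 1 <;> by_cases h2 : y = 2 <;>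
      by_cases h3 : y = 3 <;> by_cases h4 : y = 4 <;>
      simp_all <;> ring

-- B's dictionary of counts reads back List.count (it is PySem.Dict.counter).
theorem getValence_alt_eq_counts (sequence : List Int) (hunger : Int) :
    getValence_alt sequence hunger
    = -(sequence.count 0 : Int) - sequence.count 1
        + 50 * hunger * sequence.count 2 - 5 * sequence.count 3 := by
  unfold getValence_alt
  rw [← PySem.Dict.counter_eq_foldl]
  simp [PySem.Dict.getD_counter]

-- ===== VERDICT (by name: the statement is the Claim_ definition above) =====
theorem getValence_spec : Claim_equal_getValence := by
  intro sequence hunger _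
  unfold Spec_getValence getValence
  simp only [PySem.List.len_eq]
  rw [PySem.List.foldl_pyRange_zero_pyGetD' sequence 0
        (fun valence x =>
          if x = 0 then valence + (-1)
          else if x = 1 then valence + (-1)
          else if x = 2 then valence + 50 * hunger
          else if x = 3 then valence + (-5)
          else if x = 4 then valence + 0
          else valence) 0,
      getValence_foldl_count, getValence_alt_eq_counts]
  ring
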